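-- pv_equiv track=rewrite | github.com/RuanVitorr/atividades-de-Computabilidade-e-Complexidade-de-Algortimos | att13.py | afd_numero_maior_de_uns
-- ===== SOURCE A (Python) =====
-- def afd_numero_maior_de_uns(palavra):
--     estado = 'q0'
--
--     for char in palavra:
--         if estado == 'q0':
--             if char == '1':
--                 estado = 'q1'
--             elif char == '0':
--                 estado = 'q2'
--             else:
--                 return 'palavra invalida (caractere inválido)'
--         elif estado == 'q1':
--             if char == '1':
--                 estado = 'q1'
--             elif char == '0':
--                 estado = 'q1'
--             else:
--                 return 'palavra invalida (caractere inválido)'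
--         elif estado == 'q2':
--             if char == '1':
--                 estado = 'q1'
--             elif char == '0':
--                 estado = 'q2'
--             else:
--                 return 'palavra invalida (caractere inválido)'
--
--     if estado == 'q1':
--         return "palavra valida (número de '1's é maior que o número de '0's)"
--     else:
--         return "palavra invalida (número de '0's é maior ou igual ao número de '1's)"
-- ===== SOURCE B (Python) =====
-- def afd_numero_maior_de_uns(palavra):
--     zeros = palavra.count('0')
--     uns = palavra.count('1')
--     if zeros + uns != len(palavra):
--         return 'palavra invalida (caractere inválido)'
--     if uns > 0:
--         return "palavra valida (número de '1's é maior que o número de '0's)"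
--     return "palavra invalida (número de '0's é maior ou igual ao número de '1's)"
-- ===== Notes on version B (the rewrite author's own statement) =====
-- stated objective: alternative
-- what changed: Replaces the stateful three-state DFA loop with a stateless counting formulation: the word is valid binary iff the counts of the two binary digits sum to its length, and it is accepted iff the count of ones is positive.
import Mathlib
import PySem

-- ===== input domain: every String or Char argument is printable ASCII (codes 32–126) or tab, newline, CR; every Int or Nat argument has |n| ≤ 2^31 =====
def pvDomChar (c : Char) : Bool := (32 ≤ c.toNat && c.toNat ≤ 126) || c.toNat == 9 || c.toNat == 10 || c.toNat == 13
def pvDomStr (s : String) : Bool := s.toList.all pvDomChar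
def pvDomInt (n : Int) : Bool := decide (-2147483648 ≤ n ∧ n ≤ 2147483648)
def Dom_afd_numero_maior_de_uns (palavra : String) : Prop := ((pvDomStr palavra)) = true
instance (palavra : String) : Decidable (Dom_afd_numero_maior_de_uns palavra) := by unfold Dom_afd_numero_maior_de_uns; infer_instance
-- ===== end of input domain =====

-- B replaces the stateful three-state DFA loop with a stateless counting formulation
-- (valid binary iff the two digit counts sum to the length; accepted iff the count of ones is positive); objective: alternative.

-- ===== PORT A =====
-- the for-loop over the word, carrying the DFA state 'estado'
def pvAfdLoop : List Char → String → String
  | [], estado =>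
    if estado = "q1" then "palavra valida (número de '1's é maior que o número de '0's)"
    else "palavra invalida (número de '0's é maior ou igual ao número de '1's)"
  | c :: rest, estado =>
    if estado = "q0" then
      if c = '1' then pvAfdLoop rest "q1"
      else if c = '0' then pvAfdLoop rest "q2"
      else "palavra invalida (caractere inválido)"
    else if estado = "q1" then
      if c = '1' then pvAfdLoop rest "q1"
      else if c = '0' then pvAfdLoop rest "q1"
      else "palavra invalida (caractere inválido)"
    else if estado = "q2" then
      if c = '1' then pvAfdLoop rest "q1"
      else if c = '0' then pvAfdLoop rest "q2"
      else "palavra invalida (caractere inválido)"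
    else pvAfdLoop rest estado  -- unreachable fall-through of the elif chain

def afd_numero_maior_de_uns (palavra : String) : String :=
  pvAfdLoop palavra.toList "q0"

-- ===== PORT B =====
-- zeros = palavra.count('0'); uns = palavra.count('1'); then two arithmetic tests
def afd_numero_maior_de_uns_alt (palavra : String) : String :=
  let zeros := PySem.Str.count palavra "0"
  let uns := PySem.Str.count palavra "1"
  if (zeros : Int) + (uns : Int) ≠ PySem.Str.len palavra then
    "palavra invalida (caractere inválido)"
  else if uns > 0 then "palavra valida (número de '1's é maior que o número de '0's)"
  else "palavra invalida (número de '0's é maior ou igual ao número de '1's)"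

-- ===== PRECONDITION & SPEC =====
def Spec_afd_numero_maior_de_uns (palavra : String) (out : String) : Prop := out = afd_numero_maior_de_uns_alt palavra
instance (palavra : String) (out : String) : Decidable (Spec_afd_numero_maior_de_uns palavra out) := by unfold Spec_afd_numero_maior_de_uns; infer_instance

-- ===== CLAIM (what is proved, stated in full; the proofs are below) =====
def Claim_equal_afd_numero_maior_de_uns : Prop := ∀ (palavra : String), Dom_afd_numero_maior_de_uns palavra → Spec_afd_numero_maior_de_uns palavra (afd_numero_maior_de_uns palavra)

-- ===== LEMMAS AND PROOFS =====

-- PySem's substring count at a single-character pattern is List.count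
theorem pvCountGo_single (c : Char) (l : List Char) : ∀ (fuel acc : Nat), l.length ≤ fuel →
    PySem.Chars.count.go [c] fuel l acc = acc + l.count c := by
  induction l with
  | nil => intro fuel acc h; cases fuel <;> simp [PySem.Chars.count.go]
  | cons a t ih =>
    intro fuel acc h
    cases fuel with
    | zero => simp at h
    | succ n =>
      simp only [PySem.Chars.count.go]
      by_cases hc : a = c
      · subst hc
        simp [List.isPrefixOf, ih n (acc + 1) (by simpa using h)]
        omega
      · simp [List.isPrefixOf, hc, ih n acc (by simpa using h), Ne.symm hc]

theorem pvCount_single (c : Char) (l : List Char) :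
    PySem.Chars.count l [c] = l.count c := by
  simpa [PySem.Chars.count] using pvCountGo_single c l l.length 0 le_rfl

-- count '0' + count '1' as a countP
theorem pvCountP_eq (l : List Char) :
    l.countP (fun c => c == '0' || c == '1') = l.count '0' + l.count '1' := by
  induction l with
  | nil => rfl
  | cons a t ih =>
    rcases eq_or_ne a '0' with rfl | h0
    · simp [List.count_cons, ih]; omega
    · rcases eq_or_ne a '1' with rfl | h1
      · simp [List.count_cons, ih]; omega
      · simp [List.countP_cons, ih, h0, h1]

-- the word is all-binary iff the two counts fill the length
theorem pvCounts_eq_len_iff (l : List Char) :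
    l.count '0' + l.count '1' = l.length ↔ ∀ c ∈ l, c = '0' ∨ c = '1' := by
  rw [← pvCountP_eq]
  simpa using List.countP_eq_length (l := l) (p := fun c => c == '0' || c == '1')

-- characterisation of A's DFA loop from any of its reachable states
theorem pvAfdLoop_char (l : List Char) :
    (pvAfdLoop l "q1" = if ∀ c ∈ l, c = '0' ∨ c = '1' then
        "palavra valida (número de '1's é maior que o número de '0's)"
      else "palavra invalida (caractere inválido)") ∧
    (pvAfdLoop l "q0" = if ∀ c ∈ l, c = '0' ∨ c = '1' then
        (if '1' ∈ l then "palavra valida (número de '1's é maior que o número de '0's)"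
         else "palavra invalida (número de '0's é maior ou igual ao número de '1's)")
      else "palavra invalida (caractere inválido)") ∧
    (pvAfdLoop l "q2" = if ∀ c ∈ l, c = '0' ∨ c = '1' then
        (if '1' ∈ l then "palavra valida (número de '1's é maior que o número de '0's)"
         else "palavra invalida (número de '0's é maior ou igual ao número de '1's)")
      else "palavra invalida (caractere inválido)") := by
  induction l with
  | nil => refine ⟨by simp [pvAfdLoop], by simp [pvAfdLoop], by simp [pvAfdLoop]⟩
  | cons c rest ih =>
    obtain ⟨h1, h0, h2⟩ := ih
    refine ⟨?_, ?_, ?_⟩ <;>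
      · simp only [pvAfdLoop]
        by_cases hc1 : c = '1' <;> by_cases hc0 : c = '0' <;>
          simp_all

-- ===== VERDICT (by name: the statement is the Claim_ definition above) =====
theorem afd_numero_maior_de_uns_spec : Claim_equal_afd_numero_maior_de_uns := by
  intro palavra _
  show afd_numero_maior_de_uns palavra = afd_numero_maior_de_uns_alt palavra
  unfold afd_numero_maior_de_uns afd_numero_maior_de_uns_alt
  rw [(pvAfdLoop_char palavra.toList).2.1]
  have e0 : PySem.Str.count palavra "0" = palavra.toList.count '0' := by
    rw [PySem.Str.count_eq, show ("0" : String).toList = ['0'] from by decide]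
    exact pvCount_single '0' palavra.toList
  have e1 : PySem.Str.count palavra "1" = palavra.toList.count '1' := by
    rw [PySem.Str.count_eq, show ("1" : String).toList = ['1'] from by decide]
    exact pvCount_single '1' palavra.toList
  rw [e0, e1, PySem.Str.len_eq]
  by_cases hall : ∀ c ∈ palavra.toList, c = '0' ∨ c = '1'
  · have hlen : palavra.toList.count '0' + palavra.toList.count '1' = palavra.toList.length :=
      (pvCounts_eq_len_iff _).2 hall
    have hne : ¬ ((palavra.toList.count '0' : Int) + (palavra.toList.count '1' : Int) ≠ (palavra.toList.length : Int)) := by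
      push_cast; omega
    rw [if_pos hall, if_neg hne]
    by_cases h1 : '1' ∈ palavra.toList
    · rw [if_pos h1, if_pos (List.count_pos_iff.2 h1)]
    · rw [if_neg h1, if_neg (fun h => h1 (List.count_pos_iff.1 h))]
  · have hlen : palavra.toList.count '0' + palavra.toList.count '1' ≠ palavra.toList.length :=
      fun h => hall ((pvCounts_eq_len_iff _).1 h)
    have hne : ((palavra.toList.count '0' : Int) + (palavra.toList.count '1' : Int) ≠ (palavra.toList.length : Int)) := by
      push_cast; omega
    rw [if_neg hall, if_pos hne]
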